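-- pv_equiv track=rewrite | github.com/lixiang2017/leetcode | leetcode-cn/1909.0_Remove_One_Element_to_Make_the_Array_Strictly_Increasing.py | canBeIncreasing
-- ===== SOURCE A (Python) =====
-- from typing import List
--
-- def canBeIncreasing(nums: List[int]) -> bool:
--     # indices for not strictly increasing pairs
--     pairs = []
--     N = len(nums)
--     for i in range(N - 1):
--         if nums[i] >= nums[i + 1]:
--             pairs.append([i, i + 1])
--             if len(pairs) > 1:
--                 return False
--     # no need to remove
--     if not pairs: return True
--     #
--     a, b = pairs[0]
--     short = [nums[a], nums[b]]
--     if a > 0: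
--         short = [nums[a - 1]] + short
--     if b <= N - 2:
--         short.append(nums[b + 1])
--     if len(short) <= 3: return True
--     # only 4 elements
--     if short[0] < short[1] < short[3] or short[0] < short[2] < short[3]:
--         return True
--     else:
--         return False
-- ===== SOURCE B (Python) =====
-- def _is_increasing(xs):
--     return all(a < b for a, b in zip(xs, xs[1:]))
--
-- def canBeIncreasing(nums):
--     if len(nums) <= 1:
--         return True
--     return any(_is_increasing(nums[:i] + nums[i + 1:]) for i in range(len(nums)))
-- ===== Notes on version B (the rewrite author's own statement) =====
-- stated objective: alternative
-- what changed: B brute-forces every single-element removal and checks the remainder with an adjacent-comparison strictly-increasing helper, instead of A's one-pass collection of violating pairs followed by a 4-element neighbourhood case analysis.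
import Mathlib
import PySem

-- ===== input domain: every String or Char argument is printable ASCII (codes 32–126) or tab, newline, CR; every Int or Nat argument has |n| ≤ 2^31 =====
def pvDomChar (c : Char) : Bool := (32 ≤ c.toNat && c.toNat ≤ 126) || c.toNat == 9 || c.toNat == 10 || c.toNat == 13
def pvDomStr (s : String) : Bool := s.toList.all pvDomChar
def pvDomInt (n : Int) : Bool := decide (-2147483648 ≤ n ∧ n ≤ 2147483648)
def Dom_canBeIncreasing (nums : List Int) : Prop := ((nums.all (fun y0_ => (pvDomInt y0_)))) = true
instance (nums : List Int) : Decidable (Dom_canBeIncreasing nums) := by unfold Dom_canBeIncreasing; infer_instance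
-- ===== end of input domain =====

-- B replaces A's one-pass violation-pair collection + 4-element neighbourhood case analysis
-- by brute force over all single-element removals (objective: alternative, not faster).

-- ===== PORT A =====
-- All indexing in A is in range, so nums[i] is ported as getD i 0 (the default is never used).
def pvGet (xs : List Int) (i : Nat) : Int := xs.getD i 0

-- the `for i in range(N-1)` loop of A: `fuel` iterations remain, current index `i`,
-- accumulator `pairs`; `none` = the early `return False`.
def pvALoop (nums : List Int) : Nat → Nat → List (Nat × Nat) → Option (List (Nat × Nat))
  | 0, _, pairs => some pairs
  | fuel + 1, i, pairs =>
    if pvGet nums i ≥ pvGet nums (i + 1) then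
      let pairs' := pairs ++ [(i, i + 1)]
      if pairs'.length > 1 then none
      else pvALoop nums fuel (i + 1) pairs'
    else pvALoop nums fuel (i + 1) pairs

def canBeIncreasing (nums : List Int) : Bool :=
  let N := nums.length
  match pvALoop nums (N - 1) 0 [] with
  | none => false                 -- early `return False`
  | some [] => true               -- `if not pairs: return True`
  | some ((a, b) :: _) =>         -- `a, b = pairs[0]`
    let short := [pvGet nums a, pvGet nums b]
    let short := if a > 0 then pvGet nums (a - 1) :: short else short
    let short := if b ≤ N - 2 then short ++ [pvGet nums (b + 1)] else short
    if short.length ≤ 3 then true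
    else decide (pvGet short 0 < pvGet short 1 ∧ pvGet short 1 < pvGet short 3)
         || decide (pvGet short 0 < pvGet short 2 ∧ pvGet short 2 < pvGet short 3)

-- ===== PORT B =====
-- `all(a < b for a, b in zip(xs, xs[1:]))`
def pvIsIncreasing (xs : List Int) : Bool :=
  (xs.zip xs.tail).all (fun p => p.1 < p.2)

def canBeIncreasing_alt (nums : List Int) : Bool :=
  if nums.length ≤ 1 then true
  else (List.range nums.length).any
    (fun i => pvIsIncreasing (nums.take i ++ nums.drop (i + 1)))

-- ===== PRECONDITION & SPEC =====
def Spec_canBeIncreasing (nums : List Int) (out : Bool) : Prop := out = canBeIncreasing_alt nums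
instance (nums : List Int) (out : Bool) : Decidable (Spec_canBeIncreasing nums out) := by unfold Spec_canBeIncreasing; infer_instance

-- ===== CLAIM (what is proved, stated in full; the proofs are below) =====
def Claim_equal_canBeIncreasing : Prop := ∀ (nums : List Int), Dom_canBeIncreasing nums → Spec_canBeIncreasing nums (canBeIncreasing nums)

-- ===== LEMMAS AND PROOFS =====

-- proof-only abbreviations
def pvViol (nums : List Int) (j : Nat) : Bool := decide (pvGet nums j ≥ pvGet nums (j + 1))

def pvVl (nums : List Int) : List Nat := (List.range (nums.length - 1)).filter (pvViol nums)

def remGet (nums : List Int) (i j : Nat) : Int := if j < i then pvGet nums j else pvGet nums (j + 1)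

lemma aLoop_spec (nums : List Int) : ∀ (fuel i : Nat) (pairs : List (Nat × Nat)), pairs.length ≤ 1 →
    pvALoop nums fuel i pairs =
      (if pairs.length + (((List.range fuel).map (· + i)).filter (pvViol nums)).length ≤ 1
       then some (pairs ++ (((List.range fuel).map (· + i)).filter (pvViol nums)).map (fun j => (j, j + 1)))
       else none) := by
  intro fuel
  induction fuel with
  | zero => intro i pairs hp; simp [pvALoop, hp]
  | succ f ih =>
    intro i pairs hp
    have hr : ((List.range (f + 1)).map (· + i)) = i :: ((List.range f).map (· + (i + 1))) := by
      rw [List.range_succ_eq_map, List.map_cons, List.map_map]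
      refine congrArg₂ List.cons (by omega) ?_
      exact List.map_congr_left (fun x _ => by simp [Function.comp]; omega)
    rw [hr]
    by_cases hc : pvGet nums i ≥ pvGet nums (i + 1)
    · have hv : pvViol nums i = true := by simp [pvViol, hc]
      rw [pvALoop]
      rw [if_pos hc]
      simp only [List.filter_cons, hv, if_true]
      rcases pairs with _ | ⟨p, ps⟩
      · simp only [List.length_nil, List.nil_append, List.length_cons]
        rw [if_neg (by simp)]
        rw [ih (i + 1) [(i, i + 1)] (by simp)]
        simp only [List.length_cons, List.length_nil]
        by_cases hl : (((List.range f).map (· + (i + 1))).filter (pvViol nums)).length = 0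
        · simp [hl]
        · rw [if_neg (by omega), if_neg (by omega)]
      · have : ps = [] := by simpa using hp
        subst this
        simp
    · have hv : pvViol nums i = false := by simp [pvViol]; omega
      rw [pvALoop, if_neg hc]
      simp only [List.filter_cons, hv]
      exact ih (i + 1) pairs hp

lemma aLoop_top (nums : List Int) :
    pvALoop nums (nums.length - 1) 0 [] =
      (if (pvVl nums).length ≤ 1 then some ((pvVl nums).map (fun j => (j, j + 1))) else none) := by
  rw [aLoop_spec nums (nums.length - 1) 0 [] (by simp)]
  have : ((List.range (nums.length - 1)).map (· + 0)) = List.range (nums.length - 1) := by simp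
  rw [this]
  simp [pvVl]

lemma mem_Vl (nums : List Int) (j : Nat) :
    j ∈ pvVl nums ↔ j < nums.length - 1 ∧ pvGet nums (j + 1) ≤ pvGet nums j := by
  simp [pvVl, List.mem_filter, List.mem_range, pvViol, ge_iff_le]

lemma nonviol (nums : List Int) (j : Nat) (hj : j < nums.length - 1) (h : j ∉ pvVl nums) :
    pvGet nums j < pvGet nums (j + 1) := by
  by_contra hlt
  exact h ((mem_Vl nums j).mpr ⟨hj, by omega⟩)

lemma isInc_iff (xs : List Int) :
    pvIsIncreasing xs = true ↔ ∀ j, j + 1 < xs.length → pvGet xs j < pvGet xs (j + 1) := by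
  induction xs with
  | nil => simp [pvIsIncreasing]
  | cons a t ih =>
    cases t with
    | nil => simp [pvIsIncreasing]
    | cons b t' =>
      have hstep : pvIsIncreasing (a :: b :: t') = (decide (a < b) && pvIsIncreasing (b :: t')) := by
        simp [pvIsIncreasing]
      rw [hstep]
      constructor
      · intro h j hj
        obtain ⟨h1, h2⟩ : a < b ∧ pvIsIncreasing (b :: t') = true := by simpa using h
        cases j with
        | zero => simpa [pvGet] using h1
        | succ k =>
          have := (ih.mp h2) k (by simpa using hj)
          simpa [pvGet] using this
      · intro h
        have h1 : a < b := by simpa [pvGet] using h 0 (by simp)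
        have h2 : pvIsIncreasing (b :: t') = true := by
          refine ih.mpr ?_
          intro k hk
          have := h (k + 1) (by simpa using hk)
          simpa [pvGet] using this
        simp [h1, h2]

lemma getD_remove (nums : List Int) (i j : Nat) (hi : i < nums.length) (hj : j < nums.length - 1) :
    pvGet (nums.take i ++ nums.drop (i + 1)) j = remGet nums i j := by
  simp only [remGet, pvGet]
  by_cases hji : j < i
  · rw [if_pos hji, List.getD_append _ _ _ _ (by simp; omega),
      List.getD_eq_getElem _ _ (by simp; omega), List.getD_eq_getElem _ _ (by omega : j < nums.length)]
    simp [List.getElem_take]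
  · rw [if_neg hji]
    have hlt : (nums.take i).length = i := by simp; omega
    rw [List.getD_append_right _ _ _ _ (by rw [hlt]; omega)]
    have h1 : j - (nums.take i).length < (nums.drop (i + 1)).length := by simp [hlt]; omega
    rw [List.getD_eq_getElem _ _ h1, List.getD_eq_getElem _ _ (by omega : j + 1 < nums.length)]
    rw [List.getElem_drop]
    congr 1
    rw [hlt]; omega

lemma alt_true_iff (nums : List Int) (h2 : 2 ≤ nums.length) :
    canBeIncreasing_alt nums = true ↔
      ∃ i < nums.length, ∀ j, j + 1 < nums.length - 1 → remGet nums i j < remGet nums i (j + 1) := by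
  unfold canBeIncreasing_alt
  rw [if_neg (by omega)]
  rw [List.any_eq_true]
  constructor
  · rintro ⟨i, hi, hinc⟩
    rw [List.mem_range] at hi
    refine ⟨i, hi, ?_⟩
    intro j hj
    have hlen : (nums.take i ++ nums.drop (i + 1)).length = nums.length - 1 := by
      simp; omega
    have := (isInc_iff _).mp hinc j (by omega)
    rwa [getD_remove nums i j hi (by omega), getD_remove nums i (j + 1) hi (by omega)] at this
  · rintro ⟨i, hi, hrem⟩
    refine ⟨i, List.mem_range.mpr hi, ?_⟩
    refine (isInc_iff _).mpr ?_
    intro j hj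
    have hlen : (nums.take i ++ nums.drop (i + 1)).length = nums.length - 1 := by
      simp; omega
    rw [hlen] at hj
    rw [getD_remove nums i j hi (by omega), getD_remove nums i (j + 1) hi (by omega)]
    exact hrem j hj

lemma viol_survives (nums : List Int) (i v : Nat) (hi : i < nums.length) (hv : v < nums.length - 1)
    (hP : pvGet nums (v + 1) ≤ pvGet nums v) (h : i < v ∨ v + 1 < i) :
    ∃ j, j + 1 < nums.length - 1 ∧ ¬ remGet nums i j < remGet nums i (j + 1) := by
  rcases h with h | h
  · -- i < v : the pair sits at positions (v - 1, v)
    refine ⟨v - 1, by omega, ?_⟩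
    have e1 : remGet nums i (v - 1) = pvGet nums v := by
      unfold remGet; rw [if_neg (by omega)]; congr 1; omega
    have e2 : remGet nums i (v - 1 + 1) = pvGet nums (v + 1) := by
      unfold remGet; rw [if_neg (by omega)]; congr 1; omega
    rw [e1, e2]; omega
  · -- v + 1 < i : the pair sits at positions (v, v + 1)
    refine ⟨v, by omega, ?_⟩
    have e1 : remGet nums i v = pvGet nums v := by
      unfold remGet; rw [if_pos (by omega)]
    have e2 : remGet nums i (v + 1) = pvGet nums (v + 1) := by
      unfold remGet; rw [if_pos (by omega)]
    rw [e1, e2]; omega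

lemma remGet_lt (nums : List Int) (i j : Nat) (h : j < i) : remGet nums i j = pvGet nums j :=
  if_pos h

lemma remGet_ge (nums : List Int) (i j : Nat) (h : i ≤ j) : remGet nums i j = pvGet nums (j + 1) :=
  if_neg (by omega)

-- A's result when no violating pair was found
lemma A_none (nums : List Int) (hV : pvVl nums = []) : canBeIncreasing nums = true := by
  simp only [canBeIncreasing, aLoop_top nums, hV]
  simp

-- A's result when at least two violating pairs were found
lemma A_two (nums : List Int) (a b : Nat) (rest : List Nat) (hV : pvVl nums = a :: b :: rest) :
    canBeIncreasing nums = false := by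
  simp only [canBeIncreasing, aLoop_top nums, hV]
  simp

-- A's result when exactly one violating pair (a, a+1) was found
lemma A_single_eval (nums : List Int) (a : Nat) (hV : pvVl nums = [a]) (_ha : a < nums.length - 1) :
    canBeIncreasing nums =
      (if 0 < a ∧ a + 2 < nums.length then
        decide ((pvGet nums (a - 1) < pvGet nums a ∧ pvGet nums a < pvGet nums (a + 2)) ∨
          (pvGet nums (a - 1) < pvGet nums (a + 1) ∧ pvGet nums (a + 1) < pvGet nums (a + 2)))
      else true) := by
  simp only [canBeIncreasing, aLoop_top nums, hV]
  simp only [List.length_cons, List.length_nil, List.map_cons, List.map_nil]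
  norm_num
  by_cases h0 : 0 < a <;> by_cases h2 : a < nums.length - 2
  · rw [if_pos h2, if_pos h0]
    have h2' : a + 2 < nums.length := by omega
    simp [h0, h2', pvGet, show a + 1 + 1 = a + 2 from rfl]
  · rw [if_neg h2, if_pos h0]
    have h2' : ¬ a + 2 < nums.length := by omega
    simp [h0, h2', pvGet]
  · rw [if_pos h2, if_neg h0]
    simp [h0, pvGet]
  · rw [if_neg h2, if_neg h0]
    simp [h0, pvGet]

-- ===== VERDICT (by name: the statement is the Claim_ definition above) =====
theorem canBeIncreasing_spec : Claim_equal_canBeIncreasing := by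
  intro nums _
  unfold Spec_canBeIncreasing
  by_cases hN : nums.length ≤ 1
  · have hV : pvVl nums = [] := by
      unfold pvVl
      have h0 : nums.length - 1 = 0 := by omega
      rw [h0]
      rfl
    rw [A_none nums hV]
    unfold canBeIncreasing_alt
    rw [if_pos hN]
  · have h2 : 2 ≤ nums.length := by omega
    rcases hV : pvVl nums with _ | ⟨a, _ | ⟨b, rest⟩⟩
    · -- no violation: both sides are true (removing the head works for B)
      rw [A_none nums hV]
      have halt : canBeIncreasing_alt nums = true := by
        refine (alt_true_iff nums h2).mpr ⟨0, by omega, ?_⟩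
        intro j hj
        rw [remGet_ge nums 0 j (by omega), remGet_ge nums 0 (j + 1) (by omega)]
        exact nonviol nums (j + 1) (by omega) (by rw [hV]; exact List.not_mem_nil)
      rw [halt]
    · -- exactly one violation, at (a, a+1)
      have ha := (mem_Vl nums a).mp (by rw [hV]; exact List.mem_singleton_self a)
      have hnv : ∀ j, j < nums.length - 1 → j ≠ a → pvGet nums j < pvGet nums (j + 1) := by
        intro j hj hja
        refine nonviol nums j hj ?_
        rw [hV]
        simpa using hja
      rw [A_single_eval nums a hV ha.1]
      by_cases hc : 0 < a ∧ a + 2 < nums.length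
      · rw [if_pos hc]
        by_cases hC : (pvGet nums (a - 1) < pvGet nums a ∧ pvGet nums a < pvGet nums (a + 2)) ∨
            (pvGet nums (a - 1) < pvGet nums (a + 1) ∧ pvGet nums (a + 1) < pvGet nums (a + 2))
        · rw [decide_eq_true hC]
          have halt : canBeIncreasing_alt nums = true := by
            refine (alt_true_iff nums h2).mpr ?_
            rcases hC with ⟨_, hC2⟩ | ⟨hC1, _⟩
            · -- nums[a] < nums[a+2]: remove index a+1
              refine ⟨a + 1, by omega, ?_⟩
              intro j hj
              rcases lt_trichotomy j a with h | h | h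
              · rw [remGet_lt nums _ j (by omega), remGet_lt nums _ (j + 1) (by omega)]
                exact hnv j (by omega) (by omega)
              · subst h
                rw [remGet_lt nums _ j (by omega), remGet_ge nums _ (j + 1) (by omega)]
                exact hC2
              · rw [remGet_ge nums _ j (by omega), remGet_ge nums _ (j + 1) (by omega)]
                exact hnv (j + 1) (by omega) (by omega)
            · -- nums[a-1] < nums[a+1]: remove index a
              refine ⟨a, by omega, ?_⟩
              intro j hj
              rcases lt_trichotomy j (a - 1) with h | h | h
              · rw [remGet_lt nums _ j (by omega), remGet_lt nums _ (j + 1) (by omega)]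
                exact hnv j (by omega) (by omega)
              · subst h
                rw [remGet_lt nums _ (a - 1) (by omega), remGet_ge nums _ (a - 1 + 1) (by omega),
                  show a - 1 + 1 = a from by omega]
                exact hC1
              · rw [remGet_ge nums _ j (by omega), remGet_ge nums _ (j + 1) (by omega)]
                exact hnv (j + 1) (by omega) (by omega)
          rw [halt]
        · rw [decide_eq_false hC]
          have hga : pvGet nums (a - 1) < pvGet nums a := by
            have := hnv (a - 1) (by omega) (by omega)
            rwa [show a - 1 + 1 = a from by omega] at this
          have hga2 : pvGet nums (a + 1) < pvGet nums (a + 2) := hnv (a + 1) (by omega) (by omega)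
          have hx : ¬ pvGet nums a < pvGet nums (a + 2) := fun h => hC (Or.inl ⟨hga, h⟩)
          have hy : ¬ pvGet nums (a - 1) < pvGet nums (a + 1) := fun h => hC (Or.inr ⟨h, hga2⟩)
          cases halt : canBeIncreasing_alt nums with
          | false => rfl
          | true =>
            exfalso
            obtain ⟨i, hi, hinc⟩ := (alt_true_iff nums h2).mp halt
            rcases lt_trichotomy i a with h | h | h
            · obtain ⟨j, hj, hbad⟩ := viol_survives nums i a hi ha.1 ha.2 (Or.inl h)
              exact hbad (hinc j hj)
            · subst h
              have := hinc (i - 1) (by omega)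
              rw [remGet_lt nums _ (i - 1) (by omega), remGet_ge nums _ (i - 1 + 1) (by omega),
                show i - 1 + 1 = i from by omega] at this
              exact hy this
            · rcases eq_or_lt_of_le (by omega : a + 1 ≤ i) with h' | h'
              · have := hinc a (by omega)
                rw [remGet_lt nums _ a (by omega), remGet_ge nums _ (a + 1) (by omega),
                  show a + 1 + 1 = a + 2 from rfl] at this
                exact hx this
              · obtain ⟨j, hj, hbad⟩ := viol_survives nums i a hi ha.1 ha.2 (Or.inr h')
                exact hbad (hinc j hj)
      · rw [if_neg hc]
        have halt : canBeIncreasing_alt nums = true := by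
          refine (alt_true_iff nums h2).mpr ?_
          by_cases h0 : a = 0
          · -- remove the head
            refine ⟨0, by omega, ?_⟩
            intro j hj
            rw [remGet_ge nums 0 j (by omega), remGet_ge nums 0 (j + 1) (by omega)]
            exact hnv (j + 1) (by omega) (by omega)
          · -- a = length - 2: remove the last element
            refine ⟨nums.length - 1, by omega, ?_⟩
            intro j hj
            rw [remGet_lt nums _ j (by omega), remGet_lt nums _ (j + 1) (by omega)]
            exact hnv j (by omega) (by omega)
        rw [halt]
    · -- at least two violations: both sides are false
      rw [A_two nums a b rest hV]
      have hpw : (pvVl nums).Pairwise (· < ·) := List.Pairwise.filter _ (List.pairwise_lt_range)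
      rw [hV] at hpw
      have hab : a < b := (List.pairwise_cons.mp hpw).1 b (by simp)
      have ha := (mem_Vl nums a).mp (by rw [hV]; exact List.mem_cons_self)
      have hb := (mem_Vl nums b).mp (by rw [hV]; exact List.mem_cons_of_mem a (List.mem_cons_self))
      cases halt : canBeIncreasing_alt nums with
      | false => rfl
      | true =>
        exfalso
        obtain ⟨i, hi, hinc⟩ := (alt_true_iff nums h2).mp halt
        by_cases hb1 : b = a + 1
        · subst hb1
          rcases lt_trichotomy i (a + 1) with h | h | h
          · obtain ⟨j, hj, hbad⟩ := viol_survives nums i (a + 1) hi hb.1 hb.2 (Or.inl h)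
            exact hbad (hinc j hj)
          · subst h
            have := hinc a (by omega)
            rw [remGet_lt nums _ a (by omega), remGet_ge nums _ (a + 1) (by omega)] at this
            have h1 := ha.2
            have h2b := hb.2
            rw [show a + 1 + 1 = a + 2 from rfl] at this h2b
            omega
          · obtain ⟨j, hj, hbad⟩ := viol_survives nums i a hi ha.1 ha.2 (Or.inr h)
            exact hbad (hinc j hj)
        · rcases Nat.lt_or_ge (a + 1) i with h | h
          · obtain ⟨j, hj, hbad⟩ := viol_survives nums i a hi ha.1 ha.2 (Or.inr h)
            exact hbad (hinc j hj)
          · obtain ⟨j, hj, hbad⟩ := viol_survives nums i b hi hb.1 hb.2 (Or.inl (by omega))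
            exact hbad (hinc j hj)
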